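-- pv_equiv track=rewrite | github.com/LichiY/test-runner | rerun_tool/patch.py | _extend_member_start_to_annotations
-- ===== SOURCE A (Python) =====
-- from typing import Dict, List, Optional, Tuple
--
-- def _extend_member_start_to_annotations(lines: List[str], member_start: int) -> int:  # 把字段或方法前紧邻的注解与注释一起纳入迁移范围。
--     prefix_start = member_start  # 默认只从成员声明行开始。
--     while prefix_start > 0:  # 向上回溯直到遇到非注解/非注释行。
--         previous_line = lines[prefix_start - 1].strip()  # 读取上一行并去掉空白。
--         if not previous_line:  # 空行说明注解块已经结束。
--             break  # 停止继续向上回溯。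
--         if previous_line.startswith('@') or previous_line.startswith('*') or previous_line.startswith('/**') or previous_line.startswith('/*'):  # 这些都属于成员声明前的注解或文档注释。
--             prefix_start -= 1  # 把当前行纳入成员前缀。
--             continue  # 继续向上回溯。
--         break  # 遇到普通代码行时停止。
--     return prefix_start  # 返回最终应纳入的起始行。
-- ===== SOURCE B (Python) =====
-- from typing import List
--
-- def _extend_member_start_to_annotations(lines: List[str], member_start: int) -> int:
--     # Forward pass counting the length of the annotation/comment run currently in
--     # progress ('/*' also covers '/**'); the run still alive at member_start is the
--     # block to pull in, so its start is member_start minus that run length.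
--     run = 0
--     for i in range(member_start):
--         s = lines[i].strip()
--         if s and s.startswith(('@', '*', '/*')):
--             run += 1
--         else:
--             run = 0
--     return member_start - run
-- ===== Notes on version B (the rewrite author's own statement) =====
-- stated objective: alternative
-- what changed: Replaces A's backward early-stopping while-loop with a single forward pass that counts the length of the annotation/comment run in progress and returns member_start minus that run length; Pre_ excludes only member_start > len(lines), where A raises IndexError.
import Mathlib
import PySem

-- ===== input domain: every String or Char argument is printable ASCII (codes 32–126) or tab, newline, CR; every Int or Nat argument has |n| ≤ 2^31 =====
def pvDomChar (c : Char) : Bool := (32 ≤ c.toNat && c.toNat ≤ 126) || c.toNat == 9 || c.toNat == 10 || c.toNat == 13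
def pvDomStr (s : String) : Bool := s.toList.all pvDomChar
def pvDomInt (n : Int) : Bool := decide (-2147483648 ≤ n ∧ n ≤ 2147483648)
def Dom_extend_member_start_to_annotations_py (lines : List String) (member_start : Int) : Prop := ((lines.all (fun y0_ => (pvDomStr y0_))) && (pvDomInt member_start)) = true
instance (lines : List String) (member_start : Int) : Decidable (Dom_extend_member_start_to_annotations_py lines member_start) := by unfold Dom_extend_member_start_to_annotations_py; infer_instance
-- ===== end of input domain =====

-- B replaces A's backward early-stopping scan with a single forward pass over the prefix; objective: alternative decomposition, same result.


-- ===== PORT A =====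
-- backward while-loop; fuel = prefix_start.toNat bounds the number of decrements
def pvALoop (lines : List String) (prefix_start : Int) : Nat → Int
  | 0 => prefix_start
  | fuel + 1 =>
    if prefix_start > 0 then
      let previous_line := PySem.Str.strip ((PySem.List.pyGet? lines (prefix_start - 1)).getD "")
      if previous_line = "" then prefix_start
      else if PySem.Str.startswith previous_line "@" || PySem.Str.startswith previous_line "*"
              || PySem.Str.startswith previous_line "/**" || PySem.Str.startswith previous_line "/*" then
        pvALoop lines (prefix_start - 1) fuel
      else prefix_start
    else prefix_start

def extend_member_start_to_annotations_py (lines : List String) (member_start : Int) : Int :=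
  pvALoop lines member_start member_start.toNat

-- ===== PORT B =====
def pvRun (lines : List String) (member_start : Int) : Int :=
  (PySem.List.pyRange 0 member_start 1).foldl
    (fun run i =>
      let s := PySem.Str.strip ((PySem.List.pyGet? lines i).getD "")
      if s ≠ "" ∧ (PySem.Str.startswith s "@" || PySem.Str.startswith s "*" || PySem.Str.startswith s "/*" : Bool) = true
      then run + 1 else 0) 0

def extend_member_start_to_annotations_py_alt (lines : List String) (member_start : Int) : Int :=
  member_start - pvRun lines member_start

-- ===== PRECONDITION & SPEC =====
-- Pre_ excludes exactly member_start > len(lines), where A raises IndexError.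
def Pre_extend_member_start_to_annotations_py (lines : List String) (member_start : Int) : Prop :=
  member_start ≤ lines.length
instance (lines : List String) (member_start : Int) : Decidable (Pre_extend_member_start_to_annotations_py lines member_start) := by unfold Pre_extend_member_start_to_annotations_py; infer_instance
def pvWitness_extend_member_start_to_annotations_py : List String × Int := (["int x;", "@Anno", "void f()"], 2)

def Spec_extend_member_start_to_annotations_py (lines : List String) (member_start : Int) (out : Int) : Prop := out = extend_member_start_to_annotations_py_alt lines member_start
instance (lines : List String) (member_start : Int) (out : Int) : Decidable (Spec_extend_member_start_to_annotations_py lines member_start out) := by unfold Spec_extend_member_start_to_annotations_py; infer_instance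

-- ===== CLAIM (what is proved, stated in full; the proofs are below) =====
def Claim_equal_extend_member_start_to_annotations_py : Prop := ∀ (lines : List String) (member_start : Int), Dom_extend_member_start_to_annotations_py lines member_start → Pre_extend_member_start_to_annotations_py lines member_start → Spec_extend_member_start_to_annotations_py lines member_start (extend_member_start_to_annotations_py lines member_start)

-- ===== LEMMAS AND PROOFS =====

-- '/*' is a prefix of '/**', so the extra '/**' test on the A side is subsumed
lemma pv_starts_imp (l : List Char) :
    PySem.Chars.startswith l ['/', '*', '*'] = true → PySem.Chars.startswith l ['/', '*'] = true := by
  intro h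
  rw [PySem.Chars.startswith_iff] at *
  exact List.IsPrefix.trans (by decide) h

lemma pv_main (lines : List String) (n : Nat) (hn : n ≤ lines.length) :
    pvALoop lines (n : Int) n = (n : Int) - pvRun lines (n : Int) := by
  induction n with
  | zero => simp [pvALoop, pvRun, PySem.List.pyRange_one_eq_nil]
  | succ n ih =>
    have hlt : n < lines.length := by omega
    have hget : PySem.List.pyGet? lines ((n : Int)) = some lines[n] := by
      rw [PySem.List.pyGet?_natCast]; simp [hlt]
    have hrange : PySem.List.pyRange 0 ((n : Int) + 1) 1
        = PySem.List.pyRange 0 (n : Int) 1 ++ [(n : Int)] :=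
      PySem.List.pyRange_one_succ_right (by positivity)
    have hR : pvRun lines ((n : Int) + 1)
        = (let s := PySem.Str.strip lines[n];
           if s ≠ "" ∧ (PySem.Str.startswith s "@" || PySem.Str.startswith s "*" || PySem.Str.startswith s "/*" : Bool) = true
           then pvRun lines (n : Int) + 1 else 0) := by
      unfold pvRun
      rw [hrange, List.foldl_append]
      simp [hget]
    have hA : pvALoop lines ((n : Int) + 1) (n + 1)
        = (let previous_line := PySem.Str.strip lines[n];
           if previous_line = "" then (n : Int) + 1
           else if PySem.Str.startswith previous_line "@" || PySem.Str.startswith previous_line "*"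
                  || PySem.Str.startswith previous_line "/**" || PySem.Str.startswith previous_line "/*" then
             pvALoop lines (n : Int) n
           else (n : Int) + 1) := by
      show (if ((n : Int) + 1) > 0 then _ else _) = _
      rw [if_pos (by positivity)]
      simp only [add_sub_cancel_right, hget, Option.getD_some]
    have hcast : (((n + 1 : Nat)) : Int) = (n : Int) + 1 := by push_cast; ring
    rw [hcast, hA, hR]
    set s := PySem.Str.strip lines[n] with hs
    by_cases he : s = ""
    · simp [he]
    · by_cases hd : PySem.Chars.startswith s.toList ['/', '*'] = true
      · simp only []
        rw [if_neg he]
        have hcond : (s ≠ "" ∧ (PySem.Str.startswith s "@" || PySem.Str.startswith s "*" || PySem.Str.startswith s "/*" : Bool) = true) := by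
          refine ⟨he, ?_⟩
          simp [PySem.Str.startswith, hd]
        rw [if_pos (by simp [PySem.Str.startswith, hd]), if_pos hcond, ih (by omega)]
        ring
      · have hc : PySem.Chars.startswith s.toList ['/', '*', '*'] = false := by
          cases hcc : PySem.Chars.startswith s.toList ['/', '*', '*']
          · rfl
          · exact absurd (pv_starts_imp _ hcc) hd
        have hd' : PySem.Chars.startswith s.toList ['/', '*'] = false := by
          cases hdd : PySem.Chars.startswith s.toList ['/', '*']
          · rfl
          · exact absurd hdd hd
        by_cases ha : PySem.Chars.startswith s.toList ['@'] = true <;>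
          by_cases hb : PySem.Chars.startswith s.toList ['*'] = true <;>
            simp [he, ha, hb, hc, hd', PySem.Str.startswith, ih (by omega)]

lemma pv_neg (lines : List String) (m : Int) (hm : m < 0) :
    pvALoop lines m m.toNat = m - pvRun lines m := by
  have ht : m.toNat = 0 := by omega
  rw [ht]
  unfold pvRun
  rw [PySem.List.pyRange_one_eq_nil (by omega)]
  simp [pvALoop]

-- ===== VERDICT (by name: the statement is the Claim_ definition above) =====
theorem extend_member_start_to_annotations_py_spec : Claim_equal_extend_member_start_to_annotations_py := by
  intro lines member_start _ hle
  unfold Spec_extend_member_start_to_annotations_py extend_member_start_to_annotations_py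
    extend_member_start_to_annotations_py_alt
  by_cases h0 : 0 ≤ member_start
  · have hms : member_start = (member_start.toNat : Int) := (Int.toNat_of_nonneg h0).symm
    rw [hms]
    simp only [Int.toNat_natCast]
    exact pv_main lines member_start.toNat
      (by unfold Pre_extend_member_start_to_annotations_py at hle; omega)
  · exact pv_neg lines member_start (by omega)
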